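-- pv_equiv track=rewrite | github.com/tbvanderwoude/icts-m | src/ictsm/solver.py | enumerate_matchings
-- ===== SOURCE A (Python) =====
-- from copy import copy
--
-- def enumerate_matchings(agents, tasks):
--     if agents:
--         (name, type), *tail = agents
--         results = []
--         for (i, (task_name, task_type)) in enumerate(tasks):
--             if type == task_type:
--                 tasks_cp = copy(tasks)
--                 tasks_cp.pop(i)
--                 if tail:
--                     results.extend(
--                         map(
--                             lambda rs: [(name, task_name)] + rs,
--                             enumerate_matchings(tail, tasks_cp),
--                         )
--                     )
--                 else:
--                     results.append([(name, task_name)])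
--         return results
--     else:
--         return []
-- ===== SOURCE B (Python) =====
-- def enumerate_matchings(agents, tasks):
--     if not agents:
--         return []
--     worklist = [([], list(tasks))]
--     for (name, typ) in agents:
--         new_worklist = []
--         for (asg, rem) in worklist:
--             for i, (tname, ttype) in enumerate(rem):
--                 if typ == ttype:
--                     new_worklist.append((asg + [(name, tname)], rem[:i] + rem[i+1:]))
--         worklist = new_worklist
--     return [asg for (asg, _) in worklist]
-- ===== Notes on version B (the rewrite author's own statement) =====
-- stated objective: alternative
-- what changed: Replaced the recursion over agents by an iterative worklist fold: one pass over agents extends every partial (assignment, remaining-tasks) state by each type-matching task, then the full assignments are read off; same lexicographic output order.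
import Mathlib
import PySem

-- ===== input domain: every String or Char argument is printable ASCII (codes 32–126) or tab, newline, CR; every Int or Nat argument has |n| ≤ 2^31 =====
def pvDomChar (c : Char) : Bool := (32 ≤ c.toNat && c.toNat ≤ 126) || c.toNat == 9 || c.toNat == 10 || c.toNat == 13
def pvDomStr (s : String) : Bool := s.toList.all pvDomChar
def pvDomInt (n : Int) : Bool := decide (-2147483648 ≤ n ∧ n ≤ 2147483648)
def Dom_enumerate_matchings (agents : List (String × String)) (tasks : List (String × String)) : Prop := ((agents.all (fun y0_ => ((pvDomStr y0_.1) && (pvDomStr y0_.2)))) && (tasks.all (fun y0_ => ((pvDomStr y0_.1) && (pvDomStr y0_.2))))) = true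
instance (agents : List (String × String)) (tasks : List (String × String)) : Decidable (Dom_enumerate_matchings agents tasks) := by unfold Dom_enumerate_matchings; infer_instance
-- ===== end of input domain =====

-- B replaces A's recursion over agents by an iterative worklist fold over (assignment, remaining-tasks) states; same values, alternative structure.

-- ===== PORT A =====
-- A's `for (i,(task_name,task_type)) in enumerate(tasks)` with `tasks_cp.pop(i)` is ported
-- as a structural recursion carrying the already-seen prefix `pre` (so `pre ++ rest` is the
-- task list with index i removed), mutually recursive with the main function as in A.
mutual
def enumerate_matchings (agents : List (String × String)) (tasks : List (String × String)) : List (List (String × String)) :=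
  match agents with
  | [] => []
  | (name, typ) :: tail => emA name typ tail [] tasks
  termination_by (agents.length, tasks.length + 1)
  decreasing_by all_goals simp_wf; omega

def emA (name typ : String) (tail : List (String × String)) (pre : List (String × String)) :
    List (String × String) → List (List (String × String))
  | [] => []
  | (tname, ttype) :: rest =>
    (if typ = ttype then
      (if tail ≠ [] then
        (enumerate_matchings tail (pre ++ rest)).map (fun rs => (name, tname) :: rs)
      else [[(name, tname)]])
    else []) ++ emA name typ tail (pre ++ [(tname, ttype)]) rest
  termination_by tl => (tail.length + 1, tl.length)
  decreasing_by all_goals simp_wf; omega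
end

-- ===== PORT B =====
-- B's inner `for i, (tname, ttype) in enumerate(rem)` building `rem[:i] + rem[i+1:]`,
-- ported as structural recursion carrying the prefix `pre` of already-seen tasks.
def emInner (name typ : String) (asg : List (String × String)) (pre : List (String × String)) :
    List (String × String) → List (List (String × String) × List (String × String))
  | [] => []
  | (tname, ttype) :: rest =>
    (if typ = ttype then [(asg ++ [(name, tname)], pre ++ rest)] else []) ++
      emInner name typ asg (pre ++ [(tname, ttype)]) rest

-- one pass of B's outer loop over the worklist
def emStep (a : String × String) (wl : List (List (String × String) × List (String × String))) :
    List (List (String × String) × List (String × String)) :=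
  wl.flatMap (fun st => emInner a.1 a.2 st.1 [] st.2)

def emFold (agents : List (String × String)) (wl : List (List (String × String) × List (String × String))) :
    List (List (String × String) × List (String × String)) :=
  agents.foldl (fun wl a => emStep a wl) wl

def enumerate_matchings_alt (agents : List (String × String)) (tasks : List (String × String)) : List (List (String × String)) :=
  if agents = [] then []
  else (emFold agents [([], tasks)]).map Prod.fst

-- ===== PRECONDITION & SPEC =====
def Spec_enumerate_matchings (agents : List (String × String)) (tasks : List (String × String)) (out : List (List (String × String))) : Prop := out = enumerate_matchings_alt agents tasks
instance (agents : List (String × String)) (tasks : List (String × String)) (out : List (List (String × String))) : Decidable (Spec_enumerate_matchings agents tasks out) := by unfold Spec_enumerate_matchings; infer_instance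

-- ===== CLAIM (what is proved, stated in full; the proofs are below) =====
def Claim_equal_enumerate_matchings : Prop := ∀ (agents : List (String × String)) (tasks : List (String × String)), Dom_enumerate_matchings agents tasks → Spec_enumerate_matchings agents tasks (enumerate_matchings agents tasks)

-- ===== LEMMAS AND PROOFS =====

theorem emFold_nil (agents : List (String × String)) : emFold agents [] = [] := by
  induction agents with
  | nil => rfl
  | cons a tl ih => simpa [emFold, emStep, List.foldl] using ih

theorem emFold_append (agents : List (String × String))
    (wl1 wl2 : List (List (String × String) × List (String × String))) :
    emFold agents (wl1 ++ wl2) = emFold agents wl1 ++ emFold agents wl2 := by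
  induction agents generalizing wl1 wl2 with
  | nil => rfl
  | cons a tl ih =>
    simp only [emFold, List.foldl] at *
    rw [show (emStep a (wl1 ++ wl2)) = emStep a wl1 ++ emStep a wl2 by
      simp [emStep, List.flatMap_append]]
    exact ih _ _

theorem emFold_single (tail : List (String × String)) :
    ∀ (p ts : List (String × String)),
      (emFold tail [(p, ts)]).map Prod.fst =
        if tail = [] then [p] else (enumerate_matchings tail ts).map (fun rs => p ++ rs) := by
  induction tail with
  | nil => intro p ts; rfl
  | cons a rest ih =>
    intro p ts
    obtain ⟨name, typ⟩ := a
    have inner : ∀ (tl pre : List (String × String)),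
        (emFold rest (emInner name typ p pre tl)).map Prod.fst =
          (emA name typ rest pre tl).map (fun rs => p ++ rs) := by
      intro tl
      induction tl with
      | nil => intro pre; simp [emInner, emA, emFold_nil]
      | cons t tl' ihtl =>
        intro pre
        obtain ⟨tname, ttype⟩ := t
        simp only [emInner, emA]
        rw [emFold_append, List.map_append, List.map_append, ihtl]
        congr 1
        by_cases h : typ = ttype
        · simp only [if_pos h]
          rw [ih (p ++ [(name, tname)]) (pre ++ tl')]
          by_cases hr : rest = []
          · simp [hr]
          · simp [hr, List.map_map, Function.comp_def]
        · simp [h, emFold_nil]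
    show (emFold ((name, typ) :: rest) [(p, ts)]).map Prod.fst = _
    have : emFold ((name, typ) :: rest) [(p, ts)] = emFold rest (emInner name typ p [] ts) := by
      simp [emFold, emStep, List.foldl]
    rw [this, inner ts []]
    simp [enumerate_matchings]

-- ===== VERDICT (by name: the statement is the Claim_ definition above) =====
theorem enumerate_matchings_spec : Claim_equal_enumerate_matchings := by
  intro agents tasks _
  unfold Spec_enumerate_matchings enumerate_matchings_alt
  by_cases h : agents = []
  · simp [h, enumerate_matchings]
  · rw [if_neg h, emFold_single agents [] tasks, if_neg h]
    simp
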